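-- pv_equiv track=rewrite | github.com/981377660LMT/algorithm-study | 11_动态规划/dp分类/路径dp/行和列分开dp/F - Teleporter Takahashi-行列分开移动.py | teleportTakanashi
-- ===== SOURCE A (Python) =====
-- from typing import List, Optional, Tuple
--
-- def teleportTakanashi(
--     sx: int, sy: int, tx: int, ty: int, a: int, b: int, c: int, d: int
-- ) -> Optional[List[Tuple[int, int]]]:
--     def move(x: int, y: int, cx: int, cy: int) -> Tuple[int, int]:
--         """起点(x,y)以(cx,cy)为中心,对称移动,并记录移动路径"""
--         path.append((cx, cy))
--         return cx - (x - cx), cy - (y - cy)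
--
--     path = []
--     if (sx & 1) ^ (tx & 1) or (sy & 1) ^ (ty & 1):
--         return
--     if a == b and sx != tx:
--         sx, sy = move(sx, sy, a, c)
--     if c == d and sy != ty:
--         sx, sy = move(sx, sy, a, c)
--     if (a == b and sx != tx) or (c == d and sy != ty):
--         return
--
--     # 必定可以移动到终点
--     while sx < tx:
--         sx, sy = move(sx, sy, a, c)
--         sx, sy = move(sx, sy, a + 1, c)
--     while sx > tx:
--         sx, sy = move(sx, sy, a + 1, c)
--         sx, sy = move(sx, sy, a, c)
--     while sy < ty:
--         sx, sy = move(sx, sy, a, c)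
--         sx, sy = move(sx, sy, a, c + 1)
--     while sy > ty:
--         sx, sy = move(sx, sy, a, c + 1)
--         sx, sy = move(sx, sy, a, c)
--
--     return path
-- ===== SOURCE B (Python) =====
-- from typing import List, Optional, Tuple
--
-- def teleportTakanashi(
--     sx: int, sy: int, tx: int, ty: int, a: int, b: int, c: int, d: int
-- ) -> Optional[List[Tuple[int, int]]]:
--     # Closed-form: each while loop of the original shifts the point by a constant
--     # (+-2,0)/(0,+-2) per iteration, so the center list is a repeated 2-pattern.
--     if (sx ^ tx) & 1 or (sy ^ ty) & 1:
--         return None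
--     path = []
--     if a == b and sx != tx:
--         path.append((a, c))
--         sx, sy = 2 * a - sx, 2 * c - sy
--     if c == d and sy != ty:
--         path.append((a, c))
--         sx, sy = 2 * a - sx, 2 * c - sy
--     if (a == b and sx != tx) or (c == d and sy != ty):
--         return None
--     if sx < tx:
--         path += [(a, c), (a + 1, c)] * ((tx - sx) // 2)
--     elif sx > tx:
--         path += [(a + 1, c), (a, c)] * ((sx - tx) // 2)
--     if sy < ty:
--         path += [(a, c), (a, c + 1)] * ((ty - sy) // 2)
--     elif sy > ty:
--         path += [(a, c + 1), (a, c)] * ((sy - ty) // 2)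
--     return path
-- ===== Notes on version B (the rewrite author's own statement) =====
-- stated objective: simpler
-- what changed: The four reflect-twice while loops are replaced by closed-form repetition: each loop translates the point by a constant (±2,0)/(0,±2), so B appends the constant two-center pattern repeated (|delta|//2) times via list multiplication instead of iterating symmetric moves.
import Mathlib
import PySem

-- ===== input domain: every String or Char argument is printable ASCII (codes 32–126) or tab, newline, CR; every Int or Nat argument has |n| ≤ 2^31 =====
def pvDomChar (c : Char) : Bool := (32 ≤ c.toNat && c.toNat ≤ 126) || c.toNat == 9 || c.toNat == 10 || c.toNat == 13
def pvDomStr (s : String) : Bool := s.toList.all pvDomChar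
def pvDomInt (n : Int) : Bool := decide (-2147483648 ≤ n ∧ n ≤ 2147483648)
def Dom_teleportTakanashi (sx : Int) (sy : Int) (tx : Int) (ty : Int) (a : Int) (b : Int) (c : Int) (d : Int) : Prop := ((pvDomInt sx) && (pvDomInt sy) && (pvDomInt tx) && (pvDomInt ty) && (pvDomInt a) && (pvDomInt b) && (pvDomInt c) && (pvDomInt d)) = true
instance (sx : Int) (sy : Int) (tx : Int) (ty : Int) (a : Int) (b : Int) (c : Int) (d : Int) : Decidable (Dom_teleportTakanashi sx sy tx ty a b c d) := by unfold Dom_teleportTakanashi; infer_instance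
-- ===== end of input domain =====

-- B replaces the four symmetric-move while loops by closed-form repetition of the
-- constant two-center pattern (simpler; same prologue and guard as A).

-- ===== PORT A =====
-- move(x,y,cx,cy): appends (cx,cy) to the path and returns the reflection of (x,y) about (cx,cy)
def tpMove (x y cx cy : Int) (path : List (Int × Int)) : (Int × Int) × List (Int × Int) :=
  ((cx - (x - cx), cy - (y - cy)), path ++ [(cx, cy)])

-- while sx < tx: move about (a,c) then (a+1,c)
def tpLoopXUp (tx a c : Int) (sx sy : Int) (path : List (Int × Int)) : Int × Int × List (Int × Int) :=
  if h : sx < tx then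
    let r1 := tpMove sx sy a c path
    let r2 := tpMove r1.1.1 r1.1.2 (a + 1) c r1.2
    tpLoopXUp tx a c r2.1.1 r2.1.2 r2.2
  else (sx, sy, path)
termination_by (tx - sx).toNat
decreasing_by simp [tpMove]; omega

-- while sx > tx: move about (a+1,c) then (a,c)
def tpLoopXDown (tx a c : Int) (sx sy : Int) (path : List (Int × Int)) : Int × Int × List (Int × Int) :=
  if h : sx > tx then
    let r1 := tpMove sx sy (a + 1) c path
    let r2 := tpMove r1.1.1 r1.1.2 a c r1.2
    tpLoopXDown tx a c r2.1.1 r2.1.2 r2.2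
  else (sx, sy, path)
termination_by (sx - tx).toNat
decreasing_by simp [tpMove]; omega

-- while sy < ty: move about (a,c) then (a,c+1)
def tpLoopYUp (ty a c : Int) (sx sy : Int) (path : List (Int × Int)) : Int × Int × List (Int × Int) :=
  if h : sy < ty then
    let r1 := tpMove sx sy a c path
    let r2 := tpMove r1.1.1 r1.1.2 a (c + 1) r1.2
    tpLoopYUp ty a c r2.1.1 r2.1.2 r2.2
  else (sx, sy, path)
termination_by (ty - sy).toNat
decreasing_by simp [tpMove]; omega

-- while sy > ty: move about (a,c+1) then (a,c)
def tpLoopYDown (ty a c : Int) (sx sy : Int) (path : List (Int × Int)) : Int × Int × List (Int × Int) :=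
  if h : sy > ty then
    let r1 := tpMove sx sy a (c + 1) path
    let r2 := tpMove r1.1.1 r1.1.2 a c r1.2
    tpLoopYDown ty a c r2.1.1 r2.1.2 r2.2
  else (sx, sy, path)
termination_by (sy - ty).toNat
decreasing_by simp [tpMove]; omega

-- Python's '(sx & 1) ^ (tx & 1)' parity test is exact as 'sx % 2 ≠ tx % 2' on Int
-- (Int.emod with divisor 2 agrees with Python's & 1 for all ints, negatives included).
def teleportTakanashi (sx : Int) (sy : Int) (tx : Int) (ty : Int) (a : Int) (b : Int) (c : Int) (d : Int) : Option (List (Int × Int)) :=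
  if sx % 2 ≠ tx % 2 ∨ sy % 2 ≠ ty % 2 then none
  else
    let s1 : Int × Int × List (Int × Int) :=
      if a = b ∧ sx ≠ tx then
        let r := tpMove sx sy a c []
        (r.1.1, r.1.2, r.2)
      else (sx, sy, [])
    let s2 : Int × Int × List (Int × Int) :=
      if c = d ∧ s1.2.1 ≠ ty then
        let r := tpMove s1.1 s1.2.1 a c s1.2.2
        (r.1.1, r.1.2, r.2)
      else s1
    if (a = b ∧ s2.1 ≠ tx) ∨ (c = d ∧ s2.2.1 ≠ ty) then none
    else
      let r1 := tpLoopXUp tx a c s2.1 s2.2.1 s2.2.2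
      let r2 := tpLoopXDown tx a c r1.1 r1.2.1 r1.2.2
      let r3 := tpLoopYUp ty a c r2.1 r2.2.1 r2.2.2
      let r4 := tpLoopYDown ty a c r3.1 r3.2.1 r3.2.2
      some r4.2.2

-- ===== PORT B =====
-- the repeated two-center pattern: [(p),(q)] * n
def tpPat (p q : Int × Int) (n : Nat) : List (Int × Int) :=
  (List.replicate n [p, q]).flatten

def teleportTakanashi_alt (sx : Int) (sy : Int) (tx : Int) (ty : Int) (a : Int) (b : Int) (c : Int) (d : Int) : Option (List (Int × Int)) :=
  if sx % 2 ≠ tx % 2 ∨ sy % 2 ≠ ty % 2 then none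
  else
    let s1 : Int × Int × List (Int × Int) :=
      if a = b ∧ sx ≠ tx then (2 * a - sx, 2 * c - sy, [(a, c)]) else (sx, sy, [])
    let s2 : Int × Int × List (Int × Int) :=
      if c = d ∧ s1.2.1 ≠ ty then (2 * a - s1.1, 2 * c - s1.2.1, s1.2.2 ++ [(a, c)]) else s1
    if (a = b ∧ s2.1 ≠ tx) ∨ (c = d ∧ s2.2.1 ≠ ty) then none
    else
      let xpart : List (Int × Int) :=
        if s2.1 < tx then tpPat (a, c) (a + 1, c) ((tx - s2.1) / 2).toNat
        else if s2.1 > tx then tpPat (a + 1, c) (a, c) ((s2.1 - tx) / 2).toNat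
        else []
      let ypart : List (Int × Int) :=
        if s2.2.1 < ty then tpPat (a, c) (a, c + 1) ((ty - s2.2.1) / 2).toNat
        else if s2.2.1 > ty then tpPat (a, c + 1) (a, c) ((s2.2.1 - ty) / 2).toNat
        else []
      some (s2.2.2 ++ xpart ++ ypart)

-- ===== PRECONDITION & SPEC =====
def Spec_teleportTakanashi (sx : Int) (sy : Int) (tx : Int) (ty : Int) (a : Int) (b : Int) (c : Int) (d : Int) (out : Option (List (Int × Int))) : Prop := out = teleportTakanashi_alt sx sy tx ty a b c d
instance (sx : Int) (sy : Int) (tx : Int) (ty : Int) (a : Int) (b : Int) (c : Int) (d : Int) (out : Option (List (Int × Int))) : Decidable (Spec_teleportTakanashi sx sy tx ty a b c d out) := by unfold Spec_teleportTakanashi; infer_instance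

-- ===== CLAIM (what is proved, stated in full; the proofs are below) =====
def Claim_equal_teleportTakanashi : Prop := ∀ (sx : Int) (sy : Int) (tx : Int) (ty : Int) (a : Int) (b : Int) (c : Int) (d : Int), Dom_teleportTakanashi sx sy tx ty a b c d → Spec_teleportTakanashi sx sy tx ty a b c d (teleportTakanashi sx sy tx ty a b c d)

-- ===== LEMMAS AND PROOFS =====

theorem tpLoopXUp_closed (tx a c : Int) (n : Nat) : ∀ (sx sy : Int) (path : List (Int × Int)),
    sx + 2 * n = tx →
    tpLoopXUp tx a c sx sy path = (tx, sy, path ++ tpPat (a, c) (a + 1, c) n) := by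
  induction n with
  | zero =>
    intro sx sy path h
    have hsx : sx = tx := by omega
    subst hsx
    rw [tpLoopXUp]
    simp [tpPat]
  | succ n ih =>
    intro sx sy path h
    rw [tpLoopXUp]
    have hlt : sx < tx := by omega
    simp only [hlt, dif_pos, tpMove]
    have e1 : (a + 1 - (a - (sx - a) - (a + 1))) = sx + 2 := by ring
    have e2 : (c - (c - (sy - c) - c)) = sy := by ring
    rw [e1, e2, ih (sx + 2) sy _ (by omega)]
    simp [tpPat, List.replicate_succ]

theorem tpLoopXUp_noop (tx a c sx sy : Int) (path : List (Int × Int)) (h : ¬ sx < tx) :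
    tpLoopXUp tx a c sx sy path = (sx, sy, path) := by
  rw [tpLoopXUp]; simp [h]

theorem tpLoopXDown_closed (tx a c : Int) (n : Nat) : ∀ (sx sy : Int) (path : List (Int × Int)),
    sx - 2 * n = tx →
    tpLoopXDown tx a c sx sy path = (tx, sy, path ++ tpPat (a + 1, c) (a, c) n) := by
  induction n with
  | zero =>
    intro sx sy path h
    have hsx : sx = tx := by omega
    subst hsx
    rw [tpLoopXDown]
    simp [tpPat]
  | succ n ih =>
    intro sx sy path h
    rw [tpLoopXDown]
    have hgt : sx > tx := by omega
    simp only [hgt, dif_pos, tpMove]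
    have e1 : (a - (a + 1 - (sx - (a + 1)) - a)) = sx - 2 := by ring
    have e2 : (c - (c - (sy - c) - c)) = sy := by ring
    rw [e1, e2, ih (sx - 2) sy _ (by omega)]
    simp [tpPat, List.replicate_succ]

theorem tpLoopXDown_noop (tx a c sx sy : Int) (path : List (Int × Int)) (h : ¬ sx > tx) :
    tpLoopXDown tx a c sx sy path = (sx, sy, path) := by
  rw [tpLoopXDown]; simp [h]

theorem tpLoopYUp_closed (ty a c : Int) (n : Nat) : ∀ (sx sy : Int) (path : List (Int × Int)),
    sy + 2 * n = ty →
    tpLoopYUp ty a c sx sy path = (sx, ty, path ++ tpPat (a, c) (a, c + 1) n) := by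
  induction n with
  | zero =>
    intro sx sy path h
    have hsy : sy = ty := by omega
    subst hsy
    rw [tpLoopYUp]
    simp [tpPat]
  | succ n ih =>
    intro sx sy path h
    rw [tpLoopYUp]
    have hlt : sy < ty := by omega
    simp only [hlt, dif_pos, tpMove]
    have e1 : (c + 1 - (c - (sy - c) - (c + 1))) = sy + 2 := by ring
    have e2 : (a - (a - (sx - a) - a)) = sx := by ring
    rw [e1, e2, ih sx (sy + 2) _ (by omega)]
    simp [tpPat, List.replicate_succ]

theorem tpLoopYUp_noop (ty a c sx sy : Int) (path : List (Int × Int)) (h : ¬ sy < ty) :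
    tpLoopYUp ty a c sx sy path = (sx, sy, path) := by
  rw [tpLoopYUp]; simp [h]

theorem tpLoopYDown_closed (ty a c : Int) (n : Nat) : ∀ (sx sy : Int) (path : List (Int × Int)),
    sy - 2 * n = ty →
    tpLoopYDown ty a c sx sy path = (sx, ty, path ++ tpPat (a, c + 1) (a, c) n) := by
  induction n with
  | zero =>
    intro sx sy path h
    have hsy : sy = ty := by omega
    subst hsy
    rw [tpLoopYDown]
    simp [tpPat]
  | succ n ih =>
    intro sx sy path h
    rw [tpLoopYDown]
    have hgt : sy > ty := by omega
    simp only [hgt, dif_pos, tpMove]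
    have e1 : (c - (c + 1 - (sy - (c + 1)) - c)) = sy - 2 := by ring
    have e2 : (a - (a - (sx - a) - a)) = sx := by ring
    rw [e1, e2, ih sx (sy - 2) _ (by omega)]
    simp [tpPat, List.replicate_succ]

theorem tpLoopYDown_noop (ty a c sx sy : Int) (path : List (Int × Int)) (h : ¬ sy > ty) :
    tpLoopYDown ty a c sx sy path = (sx, sy, path) := by
  rw [tpLoopYDown]; simp [h]

-- the x-phase of A (both x loops) ends at tx with B's closed-form x pattern appended
theorem tpPhaseX (tx a c sx sy : Int) (path : List (Int × Int)) (hx : sx % 2 = tx % 2) :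
    tpLoopXDown tx a c (tpLoopXUp tx a c sx sy path).1 (tpLoopXUp tx a c sx sy path).2.1
        (tpLoopXUp tx a c sx sy path).2.2 =
      (tx, sy, path ++
        (if sx < tx then tpPat (a, c) (a + 1, c) ((tx - sx) / 2).toNat
         else if sx > tx then tpPat (a + 1, c) (a, c) ((sx - tx) / 2).toNat
         else [])) := by
  rcases lt_trichotomy sx tx with h | h | h
  · rw [tpLoopXUp_closed tx a c ((tx - sx) / 2).toNat sx sy path (by omega)]
    dsimp only
    rw [tpLoopXDown_noop tx a c tx sy _ (by omega)]
    simp [h]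
  · subst h
    rw [tpLoopXUp_noop sx a c sx sy path (by omega)]
    dsimp only
    rw [tpLoopXDown_noop sx a c sx sy path (by omega)]
    simp
  · rw [tpLoopXUp_noop tx a c sx sy path (by omega)]
    dsimp only
    rw [tpLoopXDown_closed tx a c ((sx - tx) / 2).toNat sx sy path (by omega)]
    simp [h, not_lt.mpr (le_of_lt h)]

-- the y-phase of A (both y loops) appends B's closed-form y pattern
theorem tpPhaseY (ty a c sx sy : Int) (path : List (Int × Int)) (hy : sy % 2 = ty % 2) :
    (tpLoopYDown ty a c (tpLoopYUp ty a c sx sy path).1 (tpLoopYUp ty a c sx sy path).2.1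
        (tpLoopYUp ty a c sx sy path).2.2).2.2 =
      path ++
        (if sy < ty then tpPat (a, c) (a, c + 1) ((ty - sy) / 2).toNat
         else if sy > ty then tpPat (a, c + 1) (a, c) ((sy - ty) / 2).toNat
         else []) := by
  rcases lt_trichotomy sy ty with h | h | h
  · rw [tpLoopYUp_closed ty a c ((ty - sy) / 2).toNat sx sy path (by omega)]
    dsimp only
    rw [tpLoopYDown_noop ty a c sx ty _ (by omega)]
    simp [h]
  · subst h
    rw [tpLoopYUp_noop sy a c sx sy path (by omega)]
    dsimp only
    rw [tpLoopYDown_noop sy a c sx sy path (by omega)]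
    simp
  · rw [tpLoopYUp_noop ty a c sx sy path (by omega)]
    dsimp only
    rw [tpLoopYDown_closed ty a c ((sy - ty) / 2).toNat sx sy path (by omega)]
    simp [h, not_lt.mpr (le_of_lt h)]

-- ===== VERDICT (by name: the statement is the Claim_ definition above) =====
theorem teleportTakanashi_spec : Claim_equal_teleportTakanashi := by
  intro sx sy tx ty a b c d _
  unfold Spec_teleportTakanashi teleportTakanashi teleportTakanashi_alt
  by_cases hpar : sx % 2 ≠ tx % 2 ∨ sy % 2 ≠ ty % 2
  · simp only [hpar, if_pos]
  · push_neg at hpar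
    obtain ⟨hx, hy⟩ := hpar
    have hguard : ¬(sx % 2 ≠ tx % 2 ∨ sy % 2 ≠ ty % 2) := by simp [hx, hy]
    rw [if_neg hguard, if_neg hguard]
    dsimp only
    -- the prologue steps compute the same triples
    have hs1 : (if a = b ∧ sx ≠ tx then
          ((tpMove sx sy a c []).1.1, (tpMove sx sy a c []).1.2, (tpMove sx sy a c []).2)
        else (sx, sy, ([] : List (Int × Int)))) =
        (if a = b ∧ sx ≠ tx then (2 * a - sx, 2 * c - sy, [(a, c)]) else (sx, sy, [])) := by
      split_ifs with h
      · simp [tpMove]; constructor <;> ring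
      · rfl
    rw [hs1]
    set s1 : Int × Int × List (Int × Int) :=
      (if a = b ∧ sx ≠ tx then (2 * a - sx, 2 * c - sy, [(a, c)]) else (sx, sy, [])) with hs1def
    have hs2 : (if c = d ∧ s1.2.1 ≠ ty then
          ((tpMove s1.1 s1.2.1 a c s1.2.2).1.1, (tpMove s1.1 s1.2.1 a c s1.2.2).1.2,
            (tpMove s1.1 s1.2.1 a c s1.2.2).2)
        else s1) =
        (if c = d ∧ s1.2.1 ≠ ty then (2 * a - s1.1, 2 * c - s1.2.1, s1.2.2 ++ [(a, c)]) else s1) := by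
      split_ifs with h
      · simp [tpMove]; constructor <;> ring
      · rfl
    rw [hs2]
    set s2 : Int × Int × List (Int × Int) :=
      (if c = d ∧ s1.2.1 ≠ ty then (2 * a - s1.1, 2 * c - s1.2.1, s1.2.2 ++ [(a, c)]) else s1) with hs2def
    have hx2 : s2.1 % 2 = tx % 2 := by
      rw [hs2def, hs1def]
      split_ifs <;> simp <;> omega
    have hy2 : s2.2.1 % 2 = ty % 2 := by
      rw [hs2def, hs1def]
      split_ifs <;> simp <;> omega
    by_cases hdeg : (a = b ∧ s2.1 ≠ tx) ∨ (c = d ∧ s2.2.1 ≠ ty)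
    · rw [if_pos hdeg, if_pos hdeg]
    · rw [if_neg hdeg, if_neg hdeg]
      rw [tpPhaseX tx a c s2.1 s2.2.1 s2.2.2 hx2]
      dsimp only
      rw [tpPhaseY ty a c tx s2.2.1 _ hy2]
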